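-- pv_equiv track=rewrite | github.com/pacificus93/CodeWars-Solutions | Python/6 kyu/Possibilities-Of-Throwing-a-Coin-N-Times.py | coin
-- ===== SOURCE A (Python) =====
-- def coin(n):
--     count = 1
--     s = ['H','T']
--     sides = ['H','T']
--     sides1 = []
--
--     if n > 18:
--         n = 18
--
--     while count < n:
--         for i in s:
--             for j in sides:
--                 sides1.append(i+j)
--         sides = sides1
--         sides1 = []
--         count += 1
--     return sides
-- ===== SOURCE B (Python) =====
-- def coin(n):
--     if n > 18:
--         n = 18
--     if n < 1:
--         n = 1
--     return [''.join('H' if (i >> (n - 1 - k)) & 1 == 0 else 'T' for k in range(n))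
--             for i in range(2 ** n)]
-- ===== Notes on version B (the rewrite author's own statement) =====
-- stated objective: alternative
-- what changed: Replaces the iterative doubling loop (prefixing H/T onto all shorter sequences each round) with direct binary enumeration: each index in range of two to the clamped length is read as a big-endian bit string with zero mapped to H and one to T, reproducing A's upper cap and its single-flip result for non-positive inputs.
import Mathlib
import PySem

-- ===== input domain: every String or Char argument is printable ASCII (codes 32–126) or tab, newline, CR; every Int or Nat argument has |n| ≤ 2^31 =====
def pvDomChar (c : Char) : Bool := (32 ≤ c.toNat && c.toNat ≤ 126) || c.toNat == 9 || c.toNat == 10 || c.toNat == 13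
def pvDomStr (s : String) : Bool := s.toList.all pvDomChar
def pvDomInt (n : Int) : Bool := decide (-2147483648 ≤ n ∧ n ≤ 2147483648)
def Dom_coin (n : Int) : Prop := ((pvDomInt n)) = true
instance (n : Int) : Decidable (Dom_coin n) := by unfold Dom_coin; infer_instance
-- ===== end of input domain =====

-- B replaces A's iterative doubling loop by direct big-endian binary enumeration
-- of the 2^n flip sequences (0->H, 1->T); same behaviour, alternative algorithm.


-- ===== PORT A =====
-- inner 'for i in s: for j in sides: sides1.append(i+j)' of one while-iteration
def coinStep (s sides : List String) : List String :=
  s.foldl (fun acc i => sides.foldl (fun acc j => acc ++ [i ++ j]) acc) []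

-- the 'while count < n' loop, fuel = number of remaining iterations (n - count)
def coinLoop : Nat → List String → List String
  | 0, sides => sides
  | k + 1, sides => coinLoop k (coinStep ["H", "T"] sides)

def coin (n : Int) : List String :=
  let n' := if n > 18 then 18 else n
  coinLoop (n' - 1).toNat ["H", "T"]

-- ===== PORT B =====
-- 'H' if (i >> (n-1-k)) & 1 == 0 else 'T'
def coinBitChar (mn i k : Nat) : Char :=
  if (i >>> (mn - 1 - k)) &&& 1 == 0 then 'H' else 'T'

def coin_alt (n : Int) : List String :=
  let m := if n > 18 then 18 else if n < 1 then 1 else n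
  let mn := m.toNat
  (List.range (2 ^ mn)).map (fun i =>
    String.ofList ((List.range mn).map (coinBitChar mn i)))

-- ===== PRECONDITION & SPEC =====
def Spec_coin (n : Int) (out : List String) : Prop := out = coin_alt n
instance (n : Int) (out : List String) : Decidable (Spec_coin n out) := by unfold Spec_coin; infer_instance

-- ===== CLAIM (what is proved, stated in full; the proofs are below) =====
def Claim_equal_coin : Prop := ∀ (n : Int), Dom_coin n → Spec_coin n (coin n)

-- ===== LEMMAS AND PROOFS =====

-- the length-m enumeration B produces
def coinEnum (m : Nat) : List String :=
  (List.range (2 ^ m)).map (fun i =>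
    String.ofList ((List.range m).map (coinBitChar m i)))

theorem coin_foldl_app (i : String) (sides : List String) (acc : List String) :
    sides.foldl (fun a j => a ++ [i ++ j]) acc = acc ++ sides.map (fun j => i ++ j) := by
  induction sides generalizing acc with
  | nil => simp
  | cons h t ih => simp [List.foldl, ih]

theorem coinStep_eq (sides : List String) :
    coinStep ["H", "T"] sides
      = sides.map (fun j => "H" ++ j) ++ sides.map (fun j => "T" ++ j) := by
  simp only [coinStep, List.foldl, coin_foldl_app, List.nil_append]

theorem ofList_cons_H (c : Char) (hc : c = 'H' ∨ c = 'T') (l : List Char) :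
    String.ofList (c :: l) = (if c = 'H' then "H" else "T") ++ String.ofList l := by
  rcases hc with h | h <;> subst h <;>
    rw [show ((if _ = _ then _ else _ : String)) = String.ofList [_] from rfl,
      ← String.ofList_append] <;> rfl

theorem coinBitChar_shift (m i k : Nat) :
    coinBitChar (m + 1) i (k + 1) = coinBitChar m i k := by
  have h : m + 1 - 1 - (k + 1) = m - 1 - k := by omega
  rw [coinBitChar, coinBitChar, h]

theorem coin_strH (m i : Nat) (hi : i < 2 ^ m) :
    (List.range (m + 1)).map (coinBitChar (m + 1) i)
      = 'H' :: (List.range m).map (coinBitChar m i) := by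
  rw [List.range_succ_eq_map, List.map_cons, List.map_map]
  congr 1
  · simp [coinBitChar, Nat.shiftRight_eq_div_pow, Nat.div_eq_of_lt hi]
  · apply List.map_congr_left
    intro k _
    exact coinBitChar_shift m i k

theorem coin_div_pow_mod_two (m i j : Nat) (hj : j < m) :
    ((2 ^ m + i) / 2 ^ j) % 2 = (i / 2 ^ j) % 2 := by
  have h1 : 2 ^ m = 2 ^ j * 2 ^ (m - j) := by
    rw [← pow_add]; congr 1; omega
  rw [h1, Nat.mul_add_div (Nat.two_pow_pos j)]
  have h2 : 2 ^ (m - j) = 2 * 2 ^ (m - j - 1) := by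
    rw [← pow_succ']; congr 1; omega
  omega

theorem coin_strT (m i : Nat) (hi : i < 2 ^ m) :
    (List.range (m + 1)).map (coinBitChar (m + 1) (2 ^ m + i))
      = 'T' :: (List.range m).map (coinBitChar m i) := by
  rw [List.range_succ_eq_map, List.map_cons, List.map_map]
  congr 1
  · have : (2 ^ m + i) / 2 ^ m = 1 := by
      rw [Nat.add_div_left _ (Nat.two_pow_pos m),
        Nat.div_eq_of_lt hi]
    simp [coinBitChar, Nat.shiftRight_eq_div_pow, this]
  · apply List.map_congr_left
    intro k hk
    have hk' := List.mem_range.mp hk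
    show coinBitChar (m + 1) (2 ^ m + i) (k + 1) = coinBitChar m i k
    rw [coinBitChar_shift m _ k]
    simp only [coinBitChar, Nat.shiftRight_eq_div_pow, Nat.and_one_is_mod]
    rw [coin_div_pow_mod_two m i (m - 1 - k) (by omega)]

theorem coinEnum_succ (m : Nat) :
    coinEnum (m + 1)
      = (coinEnum m).map (fun j => "H" ++ j) ++ (coinEnum m).map (fun j => "T" ++ j) := by
  simp only [coinEnum]
  have hr : List.range (2 ^ (m + 1))
      = List.range (2 ^ m) ++ (List.range (2 ^ m)).map (fun x => 2 ^ m + x) := by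
    rw [show 2 ^ (m + 1) = 2 ^ m + 2 ^ m by ring]
    exact List.range_add
  rw [hr, List.map_append]
  congr 1
  · rw [List.map_map]
    apply List.map_congr_left
    intro i hi
    simp only [Function.comp]
    rw [coin_strH m i (List.mem_range.mp hi),
      ofList_cons_H 'H' (Or.inl rfl)]
    simp
  · rw [List.map_map, List.map_map]
    apply List.map_congr_left
    intro i hi
    simp only [Function.comp]
    rw [coin_strT m i (List.mem_range.mp hi),
      ofList_cons_H 'T' (Or.inr rfl)]
    simp

theorem coinLoop_enum (k m : Nat) :
    coinLoop k (coinEnum m) = coinEnum (m + k) := by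
  induction k generalizing m with
  | zero => rfl
  | succ k ih =>
    rw [coinLoop, coinStep_eq, ← coinEnum_succ, ih]
    congr 1
    omega

theorem coinEnum_one : coinEnum 1 = ["H", "T"] := by decide

-- ===== VERDICT (by name: the statement is the Claim_ definition above) =====
theorem coin_spec : Claim_equal_coin := by
  intro n _
  show coin n = coin_alt n
  have halt : coin_alt n = coinEnum (if n > 18 then 18 else if n < 1 then 1 else n).toNat := rfl
  have ha : coin n = coinLoop ((if n > 18 then 18 else n) - 1).toNat ["H", "T"] := rfl
  rw [ha, halt, ← coinEnum_one, coinLoop_enum]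
  congr 1
  split_ifs <;> omega
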